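-- pv_equiv track=rewrite | github.com/sandrocvrb/udacity-fundamentos-data-science-1-projeto-1 | chicago_bikeshare_pt.py | count_user_type
-- ===== SOURCE A (Python) =====
-- def column_to_list(data, index):
--     """Extrai, de uma lista de listas, uma coluna pela posição desejada retornando uma lista com todos os valores.
--
--     Arguments:
--         data {list} -- Lista contendo todas as colunas extraídas do arquivo CSV.
--         index {int} -- Posição da coluna a ser extraída.
--
--     Returns:
--         list -- Lista contendo todos os valores da coluna extraída.
--     """
--
--     column_list = []
--
--     for row in data:
--         column_list.append(row[index])
--
--     return column_list
--
-- def count_user_type(data_list):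
--     """Retorna a quantidade de cada tipo de usuário que utilizou o serviço.
--
--     Arguments:
--         data_list {list} -- Lista contendo os dados completos obtidos do CSV lido.
--
--     Returns:
--         list -- Lista contendo a quantidade de "customer" na primeira posição, "dependent" na segunda posição e "subscriber" na terceira posição.
--     """
--
--     customer = 0
--     dependent = 0
--     subscriber = 0
--
--     for row in column_to_list(data_list, -3):
--         if row.lower() == "customer":
--             customer += 1
--         elif row.lower() == "dependent":
--             dependent += 1
--         elif row.lower() == "subscriber":
--             subscriber += 1
--
--     return [customer, dependent, subscriber]
-- ===== SOURCE B (Python) =====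
-- def count_user_type(data_list):
--     """Staged passes: build the lowered user-type column once, then answer each
--     of the three questions with list.count instead of one loop with counters."""
--     lowered = [row[-3].lower() for row in data_list]
--     return [lowered.count(key) for key in ("customer", "dependent", "subscriber")]
-- ===== Notes on version B (the rewrite author's own statement) =====
-- stated objective: idiomatic
-- what changed: Replaces the single pass with three scalar accumulators and an if/elif chain by staged passes: first materialise the lowered row[-3] column as a list, then obtain each of the three results with a separate list.count scan over that column.
import Mathlib
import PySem

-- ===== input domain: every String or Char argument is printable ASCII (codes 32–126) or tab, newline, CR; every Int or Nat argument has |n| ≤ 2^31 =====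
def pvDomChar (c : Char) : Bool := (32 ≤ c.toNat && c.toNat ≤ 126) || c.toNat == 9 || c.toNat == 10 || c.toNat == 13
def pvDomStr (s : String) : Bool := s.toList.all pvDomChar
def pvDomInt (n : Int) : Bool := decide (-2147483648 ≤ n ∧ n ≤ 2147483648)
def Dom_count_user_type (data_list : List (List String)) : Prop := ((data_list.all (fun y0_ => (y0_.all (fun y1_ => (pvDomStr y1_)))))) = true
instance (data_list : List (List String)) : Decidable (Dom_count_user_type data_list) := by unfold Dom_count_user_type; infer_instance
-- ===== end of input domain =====

-- B stages the work: it materialises the lowered row[-3] column once, then answers each of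
-- the three questions with a separate list.count scan, instead of A's one loop with three
-- scalar accumulators and an if/elif chain (objective: idiomatic).

-- ===== PORT A =====
-- row[index]: pyGet? = none is Python's IndexError; Pre_ excludes those rows, the
-- .getD "" default is never reached inside Pre_.
def column_to_list (data : List (List String)) (index : Int) : List String :=
  data.foldl (fun acc row => acc ++ [(PySem.List.pyGet? row index).getD ""]) []

def count_user_type (data_list : List (List String)) : List Int :=
  let res := (column_to_list data_list (-3)).foldl
    (fun (st : Int × Int × Int) row =>
      if PySem.Str.lower row = "customer" then (st.1 + 1, st.2.1, st.2.2)
      else if PySem.Str.lower row = "dependent" then (st.1, st.2.1 + 1, st.2.2)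
      else if PySem.Str.lower row = "subscriber" then (st.1, st.2.1, st.2.2 + 1)
      else st)
    (0, 0, 0)
  [res.1, res.2.1, res.2.2]

-- ===== PORT B =====
def count_user_type_alt (data_list : List (List String)) : List Int :=
  let lowered := data_list.map (fun row => PySem.Str.lower ((PySem.List.pyGet? row (-3)).getD ""))
  ["customer", "dependent", "subscriber"].map (fun key => (PySem.List.count lowered key : Int))

-- ===== PRECONDITION & SPEC =====
-- Pre_: Python raises IndexError on row[-3] for any row shorter than 3 (in A and B alike).
def Pre_count_user_type (data_list : List (List String)) : Prop :=
  ∀ row ∈ data_list, 3 ≤ row.length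
instance (data_list : List (List String)) : Decidable (Pre_count_user_type data_list) := by
  unfold Pre_count_user_type; infer_instance

def pvWitness_count_user_type : List (List String) :=
  [["a", "Customer", "x", "y"], ["b", "subscriber", "z", "w"]]

def Spec_count_user_type (data_list : List (List String)) (out : List Int) : Prop := out = count_user_type_alt data_list
instance (data_list : List (List String)) (out : List Int) : Decidable (Spec_count_user_type data_list out) := by unfold Spec_count_user_type; infer_instance

-- ===== CLAIM (what is proved, stated in full; the proofs are below) =====
def Claim_equal_count_user_type : Prop := ∀ (data_list : List (List String)), Dom_count_user_type data_list → Pre_count_user_type data_list → Spec_count_user_type data_list (count_user_type data_list)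

-- ===== LEMMAS AND PROOFS =====

-- the extraction pass is the map of the extractor over the rows
lemma column_to_list_eq_map (data : List (List String)) (index : Int) :
    column_to_list data index = data.map (fun row => (PySem.List.pyGet? row index).getD "") := by
  unfold column_to_list
  simpa using PySem.List.foldl_append_singleton_eq_map (fun row => (PySem.List.pyGet? row index).getD "") data []

-- A's triple-counter loop over any list of values counts the three keys
lemma tripleFold_eq_counts (vals : List String) (c d s : Int) :
    vals.foldl
      (fun (st : Int × Int × Int) row =>
        if PySem.Str.lower row = "customer" then (st.1 + 1, st.2.1, st.2.2)
        else if PySem.Str.lower row = "dependent" then (st.1, st.2.1 + 1, st.2.2)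
        else if PySem.Str.lower row = "subscriber" then (st.1, st.2.1, st.2.2 + 1)
        else st)
      (c, d, s)
    = (c + ((vals.map PySem.Str.lower).count "customer" : Int),
       d + ((vals.map PySem.Str.lower).count "dependent" : Int),
       s + ((vals.map PySem.Str.lower).count "subscriber" : Int)) := by
  induction vals generalizing c d s with
  | nil => simp
  | cons v vs ih =>
    simp only [List.foldl_cons, List.map_cons, List.count_cons]
    split_ifs with h1 h2 h3 <;> simp only [ih] <;> simp_all <;> omega

-- ===== VERDICT (by name: the statement is the Claim_ definition above) =====
theorem count_user_type_spec : Claim_equal_count_user_type := by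
  intro data_list _ _
  unfold Spec_count_user_type count_user_type count_user_type_alt
  simp only [column_to_list_eq_map, tripleFold_eq_counts, List.map_map,
    PySem.List.count_eq, List.map_cons, List.map_nil, Function.comp_def]
  simp
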